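-- pv_equiv track=rewrite | github.com/issdandavis/SCBE-AETHERMOORE | src/training/tongue_scorer.py | _infer_governance
-- ===== SOURCE A (Python) =====
-- _ESCALATE_SIGNALS = ["adversari", "attack", "jailbreak", "poison", "manipul", "harmful", "misalign", "red team"]
--
-- _QUARANTINE_SIGNALS = ["uncertain", "noise", "risk", "bias", "ambiguous", "partial", "unknown"]
--
-- _DENY_SIGNALS = ["malware", "exploit", "backdoor", "trojan", "bypass safety"]
--
-- def _infer_governance(text: str) -> str:
--     """Infer governance posture (ALLOW/QUARANTINE/ESCALATE/DENY) from text signals."""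
--     lower = text.lower()
--     for sig in _DENY_SIGNALS:
--         if sig in lower:
--             return "DENY"
--     escalate_hits = sum(1 for sig in _ESCALATE_SIGNALS if sig in lower)
--     if escalate_hits >= 3:
--         return "ESCALATE"
--     quarantine_hits = sum(1 for sig in _QUARANTINE_SIGNALS if sig in lower)
--     if quarantine_hits >= 3:
--         return "QUARANTINE"
--     return "ALLOW"
-- ===== SOURCE B (Python) =====
-- _ESCALATE_SIGNALS = ["adversari", "attack", "jailbreak", "poison", "manipul", "harmful", "misalign", "red team"]
--
-- _QUARANTINE_SIGNALS = ["uncertain", "noise", "risk", "bias", "ambiguous", "partial", "unknown"]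
--
-- _DENY_SIGNALS = ["malware", "exploit", "backdoor", "trojan", "bypass safety"]
--
-- _ALL_SIGNALS = _DENY_SIGNALS + _ESCALATE_SIGNALS + _QUARANTINE_SIGNALS
--
-- def _infer_governance(text: str) -> str:
--     """Infer governance posture (ALLOW/QUARANTINE/ESCALATE/DENY) from text signals.
--
--     Text-driven single sweep: instead of running a substring search per signal,
--     walk the lowered text once left to right, at each position collecting every
--     signal that starts there, then read the posture off the resulting hit set.
--     """
--     lower = text.lower()
--     hits = set()
--     for i in range(len(lower)):
--         for sig in _ALL_SIGNALS:
--             if lower.startswith(sig, i):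
--                 hits.add(sig)
--     if any(sig in hits for sig in _DENY_SIGNALS):
--         return "DENY"
--     if sum(sig in hits for sig in _ESCALATE_SIGNALS) >= 3:
--         return "ESCALATE"
--     if sum(sig in hits for sig in _QUARANTINE_SIGNALS) >= 3:
--         return "QUARANTINE"
--     return "ALLOW"
-- ===== Notes on version B (the rewrite author's own statement) =====
-- stated objective: alternative
-- what changed: Replaces A's per-signal substring searches (early-return DENY loop plus two generator-sum count checks) with a single text-driven sweep: one left-to-right pass over the lowered text that at each position collects every signal starting there into a hit set, after which the posture is read off set membership counts.
import Mathlib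
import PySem

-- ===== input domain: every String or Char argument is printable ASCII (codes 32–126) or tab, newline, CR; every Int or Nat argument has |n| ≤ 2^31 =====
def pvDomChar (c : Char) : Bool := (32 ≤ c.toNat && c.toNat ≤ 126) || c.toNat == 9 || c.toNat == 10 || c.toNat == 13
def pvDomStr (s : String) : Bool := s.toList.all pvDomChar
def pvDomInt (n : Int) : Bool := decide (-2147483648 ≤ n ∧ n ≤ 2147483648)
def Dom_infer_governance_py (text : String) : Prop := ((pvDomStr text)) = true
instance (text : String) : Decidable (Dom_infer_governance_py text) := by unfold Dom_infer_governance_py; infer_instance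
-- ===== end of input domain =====

-- B replaces A's per-signal substring searches with one text-driven sweep that
-- collects, at each position of the lowered text, every signal starting there
-- into a hit set; same outputs, a genuinely different traversal.


-- ===== PORT A =====
def pvEscalateSignals : List String := ["adversari", "attack", "jailbreak", "poison", "manipul", "harmful", "misalign", "red team"]
def pvQuarantineSignals : List String := ["uncertain", "noise", "risk", "bias", "ambiguous", "partial", "unknown"]
def pvDenySignals : List String := ["malware", "exploit", "backdoor", "trojan", "bypass safety"]

-- the early-return 'for sig in _DENY_SIGNALS' loop
def pvDenyLoop (sigs : List String) (lower : String) : Option String :=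
  match sigs with
  | [] => none
  | sig :: rest => if PySem.Str.isIn sig lower then some "DENY" else pvDenyLoop rest lower

-- sum(1 for sig in sigs if sig in lower)
def pvGenSum (sigs : List String) (lower : String) : Int :=
  ((sigs.filter (fun sig => PySem.Str.isIn sig lower)).map (fun _ => (1 : Int))).sum

def infer_governance_py (text : String) : String :=
  let lower := PySem.Str.lower text
  match pvDenyLoop pvDenySignals lower with
  | some r => r
  | none =>
    let escalate_hits := pvGenSum pvEscalateSignals lower
    if escalate_hits ≥ 3 then "ESCALATE"
    else
      let quarantine_hits := pvGenSum pvQuarantineSignals lower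
      if quarantine_hits ≥ 3 then "QUARANTINE"
      else "ALLOW"

-- ===== PORT B =====
def pvDenyB : List String := ["malware", "exploit", "backdoor", "trojan", "bypass safety"]
def pvEscB : List String := ["adversari", "attack", "jailbreak", "poison", "manipul", "harmful", "misalign", "red team"]
def pvQuarB : List String := ["uncertain", "noise", "risk", "bias", "ambiguous", "partial", "unknown"]
def pvAllSignals : List String := pvDenyB ++ pvEscB ++ pvQuarB

-- 'for i in range(len(lower)): for sig in _ALL_SIGNALS: if lower.startswith(sig, i): hits.add(sig)'
-- recursion over the suffixes of the text; lower.startswith(sig, i) is exactly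
-- 'sig.toList is a prefix of the i-th suffix' (PySem.Chars.startswith).
def pvSweep (l : List Char) (hits : PySem.Set String) : PySem.Set String :=
  match l with
  | [] => hits
  | c :: rest =>
      pvSweep rest (pvAllSignals.foldl
        (fun h sig => if PySem.Chars.startswith (c :: rest) sig.toList then PySem.Set.add h sig else h) hits)

def infer_governance_py_alt (text : String) : String :=
  let lower := PySem.Str.lower text
  let hits := pvSweep lower.toList PySem.Set.empty
  if pvDenyB.any (fun sig => PySem.Set.contains hits sig) then "DENY"
  else if 3 ≤ pvEscB.countP (fun sig => PySem.Set.contains hits sig) then "ESCALATE"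
  else if 3 ≤ pvQuarB.countP (fun sig => PySem.Set.contains hits sig) then "QUARANTINE"
  else "ALLOW"

-- ===== PRECONDITION & SPEC =====
def Spec_infer_governance_py (text : String) (out : String) : Prop := out = infer_governance_py_alt text
instance (text : String) (out : String) : Decidable (Spec_infer_governance_py text out) := by unfold Spec_infer_governance_py; infer_instance

-- ===== CLAIM (what is proved, stated in full; the proofs are below) =====
def Claim_equal_infer_governance_py : Prop := ∀ (text : String), Dom_infer_governance_py text → Spec_infer_governance_py text (infer_governance_py text)

-- ===== LEMMAS AND PROOFS =====

-- A's early-return DENY loop fires iff at least one deny signal matches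
theorem pvDenyLoop_eq (sigs : List String) (lower : String) :
    pvDenyLoop sigs lower =
      (if 1 ≤ sigs.countP (fun sig => PySem.Str.isIn sig lower) then some "DENY" else none) := by
  induction sigs with
  | nil => simp [pvDenyLoop]
  | cons sig rest ih =>
    simp only [pvDenyLoop, ih, List.countP_cons]
    by_cases h : PySem.Str.isIn sig lower = true
    · rw [if_pos h, if_pos h, if_pos (by omega)]
    · rw [if_neg h, if_neg h, add_zero]

-- A's generator sum equals countP (as an Int)
theorem pvGenSum_eq (sigs : List String) (lower : String) :
    pvGenSum sigs lower = (sigs.countP (fun sig => PySem.Str.isIn sig lower) : Int) := by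
  induction sigs with
  | nil => simp [pvGenSum]
  | cons sig rest ih =>
    simp only [pvGenSum, List.filter_cons, List.countP_cons] at ih ⊢
    by_cases h : PySem.Str.isIn sig lower = true
    · rw [if_pos h, if_pos h]
      simp only [List.map_cons, List.sum_cons, ih]
      push_cast; ring
    · rw [if_neg h, if_neg h, add_zero]
      exact ih

-- membership after the inner per-position fold of B's sweep
theorem mem_pvStep (sigs : List String) (l : List Char) (hits : PySem.Set String) (x : String) :
    x ∈ sigs.foldl
        (fun h sig => if PySem.Chars.startswith l sig.toList then PySem.Set.add h sig else h) hits
      ↔ x ∈ hits ∨ (x ∈ sigs ∧ PySem.Chars.startswith l x.toList = true) := by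
  induction sigs generalizing hits with
  | nil => simp
  | cons sig rest ih =>
    simp only [List.foldl_cons, ih, List.mem_cons]
    by_cases h : PySem.Chars.startswith l sig.toList = true
    · rw [if_pos h]
      constructor
      · rintro (hm | hm)
        · rcases (PySem.Set.mem_add hits sig x).mp hm with h' | rfl
          · exact Or.inl h'
          · exact Or.inr ⟨Or.inl rfl, h⟩
        · exact Or.inr ⟨Or.inr hm.1, hm.2⟩
      · rintro (hm | ⟨(rfl | hm), hp⟩)
        · exact Or.inl ((PySem.Set.mem_add hits sig x).mpr (Or.inl hm))
        · exact Or.inl ((PySem.Set.mem_add hits x x).mpr (Or.inr rfl))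
        · exact Or.inr ⟨hm, hp⟩
    · rw [if_neg h]
      constructor
      · rintro (hm | hm)
        · exact Or.inl hm
        · exact Or.inr ⟨Or.inr hm.1, hm.2⟩
      · rintro (hm | ⟨(rfl | hm), hp⟩)
        · exact Or.inl hm
        · exact absurd hp h
        · exact Or.inr ⟨hm, hp⟩

-- membership after the whole sweep: a signal is hit iff it starts at some position
theorem mem_pvSweep (l : List Char) (hits : PySem.Set String) (x : String) :
    x ∈ pvSweep l hits ↔
      x ∈ hits ∨ (x ∈ pvAllSignals ∧ ∃ j, j < l.length ∧ PySem.Chars.startswith (l.drop j) x.toList = true) := by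
  induction l generalizing hits with
  | nil => simp [pvSweep]
  | cons c rest ih =>
    simp only [pvSweep, ih, mem_pvStep, List.length_cons]
    constructor
    · rintro ((hm | ⟨hs, hp⟩) | ⟨hs, j, hj, hp⟩)
      · exact Or.inl hm
      · exact Or.inr ⟨hs, 0, by omega, hp⟩
      · exact Or.inr ⟨hs, j + 1, by omega, hp⟩
    · rintro (hm | ⟨hs, j, hj, hp⟩)
      · exact Or.inl (Or.inl hm)
      · cases j with
        | zero => exact Or.inl (Or.inr ⟨hs, hp⟩)
        | succ k => exact Or.inr ⟨hs, k, by omega, hp⟩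

-- for a nonempty signal in the table, hit-set membership = Python's 'sig in lower'
theorem contains_pvSweep (l : List Char) (x : String)
    (hx : x ∈ pvAllSignals) (hne : x.toList ≠ []) :
    PySem.Set.contains (pvSweep l PySem.Set.empty) x = PySem.Chars.isIn x.toList l := by
  rw [Bool.eq_iff_iff, PySem.Set.contains_iff, mem_pvSweep, ← PySem.Chars.exists_prefix_drop_iff_isIn]
  constructor
  · rintro (hm | ⟨_, j, _, hp⟩)
    · simp [PySem.Set.empty] at hm
    · exact ⟨j, (PySem.Chars.startswith_iff _ _).mp hp⟩
  · rintro ⟨j, hp⟩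
    by_cases hj : j < l.length
    · exact Or.inr ⟨hx, j, hj, (PySem.Chars.startswith_iff _ _).mpr hp⟩
    · exfalso
      rw [List.drop_eq_nil_of_le (by omega)] at hp
      exact hne (List.prefix_nil.mp hp)

-- on every signal in one of the three lists, B's membership test agrees with A's 'in'
theorem contains_eq_isIn (sig : String) (hx : sig ∈ pvAllSignals) (text : String) :
    PySem.Set.contains (pvSweep (PySem.Str.lower text).toList PySem.Set.empty) sig
      = PySem.Str.isIn sig (PySem.Str.lower text) := by
  have hne : sig.toList ≠ [] := by
    fin_cases hx <;> decide
  rw [contains_pvSweep _ sig hx hne]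
  rfl

-- ===== VERDICT (by name: the statement is the Claim_ definition above) =====
theorem infer_governance_py_spec : Claim_equal_infer_governance_py := by
  intro text _
  unfold Spec_infer_governance_py infer_governance_py infer_governance_py_alt
  have hc : ∀ sig ∈ pvAllSignals,
      PySem.Set.contains (pvSweep (PySem.Str.lower text).toList PySem.Set.empty) sig
        = PySem.Str.isIn sig (PySem.Str.lower text) := fun sig hx => contains_eq_isIn sig hx text
  have hdeny : pvDenyB.countP (fun sig => PySem.Set.contains (pvSweep (PySem.Str.lower text).toList PySem.Set.empty) sig)
      = pvDenyB.countP (fun sig => PySem.Str.isIn sig (PySem.Str.lower text)) :=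
    List.countP_congr (fun sig hs => by rw [hc sig (by simp [pvAllSignals, hs])])
  have hesc : pvEscB.countP (fun sig => PySem.Set.contains (pvSweep (PySem.Str.lower text).toList PySem.Set.empty) sig)
      = pvEscB.countP (fun sig => PySem.Str.isIn sig (PySem.Str.lower text)) :=
    List.countP_congr (fun sig hs => by rw [hc sig (by simp [pvAllSignals, hs])])
  have hquar : pvQuarB.countP (fun sig => PySem.Set.contains (pvSweep (PySem.Str.lower text).toList PySem.Set.empty) sig)
      = pvQuarB.countP (fun sig => PySem.Str.isIn sig (PySem.Str.lower text)) :=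
    List.countP_congr (fun sig hs => by rw [hc sig (by simp [pvAllSignals, hs])])
  have hany : ∀ (l : List String) (p : String → Bool), l.any p = decide (1 ≤ l.countP p) := by
    intro l p
    rw [Bool.eq_iff_iff, List.any_eq_true, decide_eq_true_eq, Nat.one_le_iff_ne_zero, Ne,
      List.countP_eq_zero]
    push Not
    simp
  simp only [pvDenyLoop_eq, pvGenSum_eq]
  rw [show pvDenySignals = pvDenyB from rfl, show pvEscalateSignals = pvEscB from rfl,
    show pvQuarantineSignals = pvQuarB from rfl, hany, hdeny, hesc, hquar]
  split_ifs <;> simp only [decide_eq_true_eq] at * <;> first | rfl | omega
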